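-- pv_equiv track=rewrite | github.com/Spacerulerwill/AOC | 2015/1/main.py | part_two
-- ===== SOURCE A (Python) =====
-- def part_two(input_string:str) -> int:
--     floor = 0
--     position = 0
--     while floor != -1:
--         char = input_string[position]
--         if char == "(":
--             floor += 1
--         elif char == ")":
--             floor -= 1
--         position += 1
--     return position
-- ===== SOURCE B (Python) =====
-- def part_two(input_string: str) -> int:
--     depth = 0
--     prefix = []
--     for c in input_string:
--         depth += (c == '(') - (c == ')')
--         prefix.append(depth)
--     return prefix.index(-1) + 1
-- ===== Notes on version B (the rewrite author's own statement) =====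
-- stated objective: alternative
-- what changed: Replaces A's while-loop with manual indexing and early exit by building the full prefix-depth table in one pass and then locating -1 with list.index; Pre_ excludes inputs where the depth never reaches -1, on which A raises IndexError (B raises ValueError).
import Mathlib
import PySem

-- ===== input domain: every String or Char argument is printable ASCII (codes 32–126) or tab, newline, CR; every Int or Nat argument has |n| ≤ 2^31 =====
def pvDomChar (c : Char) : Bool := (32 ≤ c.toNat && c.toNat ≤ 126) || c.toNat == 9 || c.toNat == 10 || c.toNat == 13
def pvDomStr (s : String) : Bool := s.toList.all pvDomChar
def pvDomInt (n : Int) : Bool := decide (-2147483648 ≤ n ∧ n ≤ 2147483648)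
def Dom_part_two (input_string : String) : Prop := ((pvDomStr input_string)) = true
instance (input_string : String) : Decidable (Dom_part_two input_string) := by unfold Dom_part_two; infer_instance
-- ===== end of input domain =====

-- B rebuilds the answer from a full prefix-depth table + list.index instead of A's while-loop with
-- early exit (objective: alternative decomposition; same O(n) cost).

-- ===== PORT A =====
-- A's while-loop: consume characters while floor ≠ -1; none = IndexError (position past the end).
def partTwoLoopA (cs : List Char) (floor : Int) (position : Int) : Option Int :=
  if floor = -1 then some position
  else
    match cs with
    | [] => none  -- input_string[position] raises IndexError here
    | c :: rest =>
        let floor' := if c = '(' then floor + 1 else if c = ')' then floor - 1 else floor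
        partTwoLoopA rest floor' (position + 1)

def part_two (input_string : String) : Int :=
  (partTwoLoopA input_string.toList 0 0).getD 0  -- getD unreachable under Pre_

-- ===== PORT B =====
-- Source B: one pass building the prefix-depth list, then prefix.index(-1) + 1.
def part_two_alt (input_string : String) : Int :=
  let st := input_string.toList.foldl
    (fun (acc : Int × List Int) c =>
      let depth := acc.1 + ((if c = '(' then (1 : Int) else 0) - (if c = ')' then 1 else 0))
      (depth, acc.2 ++ [depth]))
    (0, [])
  match PySem.List.index? st.2 (-1) with
  | some i => (i : Int) + 1
  | none => 0  -- prefix.index(-1) raises ValueError here; unreachable under Pre_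

-- ===== PRECONDITION & SPEC =====
-- spec-level prefix-sum table: running depth after each character
def pvStep (c : Char) : Int := if c = '(' then 1 else if c = ')' then -1 else 0

def pvPrefixes (f : Int) : List Char → List Int
  | [] => []
  | c :: r => (f + pvStep c) :: pvPrefixes (f + pvStep c) r

-- Pre_ excludes exactly the inputs whose running depth never reaches -1: there A raises
-- IndexError (runs off the string) and B raises ValueError (index(-1) fails).
def Pre_part_two (input_string : String) : Prop :=
  (-1 : Int) ∈ pvPrefixes 0 input_string.toList
instance (input_string : String) : Decidable (Pre_part_two input_string) := by
  unfold Pre_part_two; infer_instance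

def pvWitness_part_two : String := "()())"

def Spec_part_two (input_string : String) (out : Int) : Prop := out = part_two_alt input_string
instance (input_string : String) (out : Int) : Decidable (Spec_part_two input_string out) := by
  unfold Spec_part_two; infer_instance

-- ===== CLAIM (what is proved, stated in full; the proofs are below) =====
def Claim_equal_part_two : Prop := ∀ (input_string : String), Dom_part_two input_string → Pre_part_two input_string → Spec_part_two input_string (part_two input_string)

-- ===== LEMMAS AND PROOFS =====
theorem pvStep_branch (f : Int) (c : Char) :
    (if c = '(' then f + 1 else if c = ')' then f - 1 else f) = f + pvStep c := by
  simp only [pvStep]; split_ifs <;> ring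

theorem pvStep_diff (f : Int) (c : Char) :
    f + ((if c = '(' then (1 : Int) else 0) - (if c = ')' then 1 else 0)) = f + pvStep c := by
  by_cases h1 : c = '(' <;> by_cases h2 : c = ')' <;> simp [pvStep, h1, h2]

-- A's loop returns pos + (first index of -1 in the prefix table) + 1, or none if absent.
theorem loopA_index (l : List Char) (f : Int) (pos : Int) (hf : f ≠ -1) :
    partTwoLoopA l f pos =
      match PySem.List.index? (pvPrefixes f l) (-1) with
      | some i => some (pos + i + 1)
      | none => none := by
  induction l generalizing f pos with
  | nil => simp [partTwoLoopA, hf, pvPrefixes, PySem.List.index?_eq_idxOf?, List.idxOf?]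
  | cons c r ih =>
      rw [partTwoLoopA]
      simp only [hf, if_false, pvStep_branch]
      by_cases h' : f + pvStep c = -1
      · rw [partTwoLoopA.eq_def, pvPrefixes, h', PySem.List.index?_cons_self]
        simp
      · rw [ih _ _ h']
        have hne : f + pvStep c ≠ (-1 : Int) := h'
        rw [pvPrefixes, PySem.List.index?_cons_of_ne _ hne]
        cases hidx : PySem.List.index? (pvPrefixes (f + pvStep c) r) (-1) with
        | none => simp
        | some i =>
            simp only [Option.map_some]
            push_cast
            ring_nf

-- B's foldl builds exactly (final depth, ys ++ prefix table).
theorem foldB_prefixes (l : List Char) (f : Int) (ys : List Int) :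
    l.foldl
      (fun (acc : Int × List Int) c =>
        let depth := acc.1 + ((if c = '(' then (1 : Int) else 0) - (if c = ')' then 1 else 0))
        (depth, acc.2 ++ [depth]))
      (f, ys) = (f + (l.map pvStep).sum, ys ++ pvPrefixes f l) := by
  induction l generalizing f ys with
  | nil => simp [pvPrefixes]
  | cons c r ih =>
      simp only [List.foldl_cons, pvStep_diff] at ih ⊢
      rw [ih, pvPrefixes]
      simp [add_assoc]

theorem part_two_alt_eq (s : String) :
    part_two_alt s =
      match PySem.List.index? (pvPrefixes 0 s.toList) (-1) with
      | some i => (i : Int) + 1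
      | none => 0 := by
  rw [part_two_alt]
  rw [foldB_prefixes s.toList 0 []]
  simp

-- ===== VERDICT (by name: the statement is the Claim_ definition above) =====
theorem part_two_spec : Claim_equal_part_two := by
  intro s _ hpre
  unfold Spec_part_two
  unfold Pre_part_two at hpre
  rw [← PySem.List.index?_isSome_iff] at hpre
  rw [part_two, part_two_alt_eq]
  rw [loopA_index s.toList 0 0 (by decide)]
  cases hidx : PySem.List.index? (pvPrefixes 0 s.toList) (-1) with
  | none => rw [hidx] at hpre; simp at hpre
  | some i => simp
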